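-- pv_equiv track=rewrite | github.com/eliottcassidy2000/math | 04-computation/omega_perfectness_implications.py | is_strongly_connected
-- ===== SOURCE A (Python) =====
-- def is_strongly_connected(adj, vertices):
--     """Check if sub-tournament on vertices is strongly connected."""
--     k = len(vertices)
--     if k <= 1:
--         return True
--     if k == 2:
--         return False
--     vlist = list(vertices)
--     vset = set(vertices)
--
--     def reachable(start, forward=True):
--         visited = {start}
--         stack = [start]
--         while stack:
--             u = stack.pop()
--             for v in vlist:
--                 if v not in visited and v in vset:
--                     if (forward and adj[u][v]) or (not forward and adj[v][u]):
--                         visited.add(v)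
--                         stack.append(v)
--         return visited
--
--     fwd = reachable(vlist[0], True)
--     if len(fwd) != k:
--         return False
--     rev = reachable(vlist[0], False)
--     return len(rev) == k
-- ===== SOURCE B (Python) =====
-- def is_strongly_connected(adj, vertices):
--     """Check if sub-tournament on vertices is strongly connected."""
--     k = len(vertices)
--     if k <= 1:
--         return True
--     if k == 2:
--         return False
--     vlist = list(vertices)
--     start = vlist[0]
--
--     def closure_size(forward):
--         # round-based saturation: k rounds of a dense "add every vertex
--         # seen from the current frontier snapshot" step
--         reach = {start}
--         for _ in range(k):
--             reach = reach | {v for v in vlist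
--                              if v not in reach
--                              and any((adj[u][v] if forward else adj[v][u])
--                                      for u in reach)}
--         return len(reach)
--
--     return closure_size(True) == k and closure_size(False) == k
-- ===== Notes on version B (the rewrite author's own statement) =====
-- stated objective: alternative
-- what changed: A's two single-source DFS passes (explicit stack, in-place visited growth) are replaced by a round-based saturation: k dense rounds each adding every vertex seen from a snapshot of the current reachable set, then the same two size checks.
import Mathlib
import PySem

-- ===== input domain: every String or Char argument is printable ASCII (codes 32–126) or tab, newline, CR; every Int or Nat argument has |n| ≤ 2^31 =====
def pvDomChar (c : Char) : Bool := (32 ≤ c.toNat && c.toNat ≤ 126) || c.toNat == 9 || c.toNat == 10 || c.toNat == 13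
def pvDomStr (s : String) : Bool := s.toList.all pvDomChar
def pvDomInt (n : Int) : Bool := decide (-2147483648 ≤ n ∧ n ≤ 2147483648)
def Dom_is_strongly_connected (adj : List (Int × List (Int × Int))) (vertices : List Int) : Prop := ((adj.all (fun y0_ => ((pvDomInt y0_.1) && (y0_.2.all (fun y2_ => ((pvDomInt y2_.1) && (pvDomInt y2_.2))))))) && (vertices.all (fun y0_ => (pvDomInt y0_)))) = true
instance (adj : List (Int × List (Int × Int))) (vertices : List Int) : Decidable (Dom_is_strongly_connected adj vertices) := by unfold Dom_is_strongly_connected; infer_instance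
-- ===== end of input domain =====

-- B replaces A's two stack-based DFS passes by a round-based dense saturation of the
-- reachable set (k rounds of an all-pairs frontier step); alternative algorithm, not faster.

-- ===== PORT A =====
-- adj[u][v] totalized with defaults; exact under Pre_ (both keys present)
def pvLookupA (adj : List (Int × List (Int × Int))) (u v : Int) : Int :=
  PySem.Dict.getD (PySem.Dict.mk (PySem.Dict.getD (PySem.Dict.mk adj) u [])) v 0

-- the body of `reachable`'s inner `for v in vlist:` loop, for one popped u
def pvDfsStep (adj : List (Int × List (Int × Int))) (vlist : List Int)
    (vset : PySem.Set Int) (forward : Bool) (u : Int)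
    (p0 : PySem.Set Int × List Int) : PySem.Set Int × List Int :=
  vlist.foldl (fun p v =>
    if (!(PySem.Set.contains p.1 v) && PySem.Set.contains vset v)
        && ((forward && (pvLookupA adj u v != 0)) || (!forward && (pvLookupA adj v u != 0)))
    then (PySem.Set.add p.1 v, p.2 ++ [v]) else p) p0

-- lemmas the port needs for termination (cited by name in decreasing_by)
theorem pvDfsStep_mono (adj : List (Int × List (Int × Int))) (vlist : List Int)
    (vset : PySem.Set Int) (forward : Bool) (u : Int) (p0 : PySem.Set Int × List Int)
    (x : Int) (hx : x ∈ p0.1) : x ∈ (pvDfsStep adj vlist vset forward u p0).1 := by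
  induction vlist generalizing p0 with
  | nil => exact hx
  | cons v vs ih =>
      simp only [pvDfsStep, List.foldl_cons] at *
      split
      · exact ih _ (by simp only [PySem.Set.mem_add]; exact Or.inl hx)
      · exact ih _ hx

theorem pvDfsStep_cases (adj : List (Int × List (Int × Int))) (vlist : List Int)
    (vset : PySem.Set Int) (forward : Bool) (u : Int) (p0 : PySem.Set Int × List Int) :
    pvDfsStep adj vlist vset forward u p0 = p0 ∨
      ∃ v ∈ vlist, v ∉ p0.1 ∧ v ∈ (pvDfsStep adj vlist vset forward u p0).1 := by
  induction vlist generalizing p0 with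
  | nil => exact Or.inl rfl
  | cons v vs ih =>
      simp only [pvDfsStep, List.foldl_cons] at *
      by_cases hc : ((!(PySem.Set.contains p0.1 v) && PySem.Set.contains vset v)
          && ((forward && (pvLookupA adj u v != 0)) || (!forward && (pvLookupA adj v u != 0)))) = true
      · rw [if_pos hc]
        refine Or.inr ⟨v, by simp, ?_, ?_⟩
        · intro hv
          simp at hc
          exact hc.1.1 hv
        · exact pvDfsStep_mono adj vs vset forward u _ v (by simp [PySem.Set.mem_add])
      · rw [if_neg hc]
        rcases ih (p0 := p0) with h | ⟨w, hw, hw1, hw2⟩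
        · exact Or.inl h
        · exact Or.inr ⟨w, by simp [hw], hw1, hw2⟩

theorem pv_filter_lt (l : List Int) (s t : PySem.Set Int)
    (hsub : ∀ x, x ∈ s → x ∈ t) (v : Int) (hv : v ∈ l) (hvs : v ∉ s) (hvt : v ∈ t) :
    (l.filter (fun x => !(PySem.Set.contains t x))).length <
      (l.filter (fun x => !(PySem.Set.contains s x))).length := by
  have hq : l.filter (fun x => !(PySem.Set.contains t x)) =
      (l.filter (fun x => !(PySem.Set.contains s x))).filter
        (fun x => !(PySem.Set.contains t x)) := by
    rw [List.filter_filter]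
    apply List.filter_congr
    intro x _
    simp
    exact fun h hs' => h (hsub x hs')
  rw [hq]
  apply List.length_filter_lt_length_iff_exists.2
  exact ⟨v, by simp [List.mem_filter, hv]; exact hvs, by simp; exact hvt⟩

-- the `while stack:` loop of `reachable`
def pvDfsLoop (adj : List (Int × List (Int × Int))) (vlist : List Int)
    (vset : PySem.Set Int) (forward : Bool)
    (visited : PySem.Set Int) (stack : List Int) : PySem.Set Int :=
  match h : stack.getLast? with
  | none => visited
  | some u =>
      let p := pvDfsStep adj vlist vset forward u (visited, stack.dropLast)
      pvDfsLoop adj vlist vset forward p.1 p.2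
termination_by ((vlist.filter (fun x => !(PySem.Set.contains visited x))).length, stack.length)
decreasing_by
  rcases pvDfsStep_cases adj vlist vset forward u (visited, stack.dropLast) with hcase | ⟨v, hv, hv1, hv2⟩
  · rw [hcase]
    apply Prod.Lex.right
    have hne : stack ≠ [] := by
      intro hs; rw [hs] at h; simp at h
    have hz : stack.length ≠ 0 := fun hz => hne (List.eq_nil_of_length_eq_zero hz)
    simp only [List.length_dropLast]
    omega
  · apply Prod.Lex.left
    exact pv_filter_lt vlist visited _ (fun x hx =>
      pvDfsStep_mono adj vlist vset forward u (visited, stack.dropLast) x hx) v hv hv1 hv2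

def is_strongly_connected (adj : List (Int × List (Int × Int))) (vertices : List Int) : Bool :=
  let k := vertices.length
  if k ≤ 1 then true
  else if k = 2 then false
  else
    let vlist := vertices
    let vset := PySem.Set.ofList vertices
    let start := vlist.headD 0
    let fwd := pvDfsLoop adj vlist vset true (PySem.Set.ofList [start]) [start]
    if fwd.length ≠ k then false
    else (pvDfsLoop adj vlist vset false (PySem.Set.ofList [start]) [start]).length == k

-- ===== PORT B =====
def pvLookupB (adj : List (Int × List (Int × Int))) (u v : Int) : Int :=
  PySem.Dict.getD (PySem.Dict.mk (PySem.Dict.getD (PySem.Dict.mk adj) u [])) v 0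

def pvEdgeB (adj : List (Int × List (Int × Int))) (forward : Bool) (u v : Int) : Bool :=
  (if forward then pvLookupB adj u v else pvLookupB adj v u) != 0

-- one saturation round: reach | {v for v in vlist if v not in reach and any(edge(u,v) for u in reach)}
def pvRound (adj : List (Int × List (Int × Int))) (vlist : List Int) (forward : Bool)
    (reach : PySem.Set Int) : PySem.Set Int :=
  PySem.Set.union reach (PySem.Set.ofList (vlist.filter (fun v =>
    !(PySem.Set.contains reach v) && reach.any (fun u => pvEdgeB adj forward u v))))

-- closure_size: k rounds from {start}, then len
def pvClosLen (adj : List (Int × List (Int × Int))) (vlist : List Int) (k : Nat)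
    (start : Int) (forward : Bool) : Nat :=
  ((List.range k).foldl (fun reach _ => pvRound adj vlist forward reach)
    (PySem.Set.ofList [start])).length

def is_strongly_connected_alt (adj : List (Int × List (Int × Int))) (vertices : List Int) : Bool :=
  let k := vertices.length
  if k ≤ 1 then true
  else if k = 2 then false
  else
    let vlist := vertices
    let start := vlist.headD 0
    (pvClosLen adj vlist k start true == k) && (pvClosLen adj vlist k start false == k)

-- ===== PRECONDITION & SPEC =====
-- Pre_ requires, when k ≥ 3, an adj entry for every ordered pair of vertices: the closed-form
-- guarantee that no dict lookup can raise KeyError in either program.  It is slightly narrower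
-- than A's exact domain: A's lazy traversal sometimes returns False before touching a missing
-- entry, where B's dense scan would raise KeyError (see cites).
def Pre_is_strongly_connected (adj : List (Int × List (Int × Int))) (vertices : List Int) : Prop :=
  vertices.length ≤ 2 ∨
    (∀ u ∈ vertices, ∀ v ∈ vertices,
      PySem.Dict.contains (PySem.Dict.mk adj) u = true ∧
      PySem.Dict.contains (PySem.Dict.mk (PySem.Dict.getD (PySem.Dict.mk adj) u [])) v = true)
instance (adj : List (Int × List (Int × Int))) (vertices : List Int) : Decidable (Pre_is_strongly_connected adj vertices) := by unfold Pre_is_strongly_connected; infer_instance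

def pvWitness_is_strongly_connected : (List (Int × List (Int × Int))) × List Int :=
  ([(0, [(0, 0), (1, 1), (2, 0)]), (1, [(0, 0), (1, 0), (2, 1)]), (2, [(0, 1), (1, 0), (2, 0)])],
   [0, 1, 2])

def Spec_is_strongly_connected (adj : List (Int × List (Int × Int))) (vertices : List Int) (out : Bool) : Prop := out = is_strongly_connected_alt adj vertices
instance (adj : List (Int × List (Int × Int))) (vertices : List Int) (out : Bool) : Decidable (Spec_is_strongly_connected adj vertices out) := by unfold Spec_is_strongly_connected; infer_instance

-- ===== CLAIM (what is proved, stated in full; the proofs are below) =====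
def Claim_equal_is_strongly_connected : Prop := ∀ (adj : List (Int × List (Int × Int))) (vertices : List Int), Dom_is_strongly_connected adj vertices → Pre_is_strongly_connected adj vertices → Spec_is_strongly_connected adj vertices (is_strongly_connected adj vertices)

-- ===== LEMMAS AND PROOFS =====

-- the step relation of the digraph restricted to the vertex set, and reachability from s
def pvStep (adj : List (Int × List (Int × Int))) (f : Bool) (vs : List Int) (a b : Int) : Prop :=
  b ∈ vs ∧ pvEdgeB adj f a b = true

def pvR (adj : List (Int × List (Int × Int))) (f : Bool) (vs : List Int) (s x : Int) : Prop :=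
  Relation.ReflTransGen (pvStep adj f vs) s x

theorem pv_edge_bridge (adj : List (Int × List (Int × Int))) (f : Bool) (u v : Int) :
    ((f && (pvLookupA adj u v != 0)) || (!f && (pvLookupA adj v u != 0))) = pvEdgeB adj f u v := by
  cases f <;> simp [pvEdgeB, pvLookupA, pvLookupB]

-- full membership characterisation of the inner for-loop
theorem pvDfsStep_mem (adj : List (Int × List (Int × Int))) (l : List Int)
    (vset : PySem.Set Int) (f : Bool) (u : Int) (p0 : PySem.Set Int × List Int) (x : Int) :
    x ∈ (pvDfsStep adj l vset f u p0).1 ↔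
      x ∈ p0.1 ∨ (x ∈ l ∧ x ∈ vset ∧ pvEdgeB adj f u x = true) := by
  induction l generalizing p0 with
  | nil => simp [pvDfsStep]
  | cons v vs ih =>
      simp only [pvDfsStep, List.foldl_cons, pv_edge_bridge] at *
      by_cases hv1 : v ∈ p0.1
      · rw [if_neg (by simp; exact fun h => absurd hv1 h)]
        rw [ih]
        constructor
        · rintro (h | ⟨h1, h2, h3⟩)
          · exact Or.inl h
          · exact Or.inr ⟨by simp [h1], h2, h3⟩
        · rintro (h | ⟨h1, h2, h3⟩)
          · exact Or.inl h
          · rcases List.mem_cons.1 h1 with rfl | h1'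
            · exact Or.inl hv1
            · exact Or.inr ⟨h1', h2, h3⟩
      · by_cases hv2 : v ∈ vset
        · by_cases hv3 : pvEdgeB adj f u v = true
          · rw [if_pos (by simp [hv3]; exact ⟨hv1, hv2⟩)]
            rw [ih]
            simp only [PySem.Set.mem_add]
            constructor
            · rintro ((h | rfl) | ⟨h1, h2, h3⟩)
              · exact Or.inl h
              · exact Or.inr ⟨by simp, hv2, hv3⟩
              · exact Or.inr ⟨by simp [h1], h2, h3⟩
            · rintro (h | ⟨h1, h2, h3⟩)
              · exact Or.inl (Or.inl h)
              · rcases List.mem_cons.1 h1 with rfl | h1'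
                · exact Or.inl (Or.inr rfl)
                · exact Or.inr ⟨h1', h2, h3⟩
          · rw [if_neg (by simp [hv3])]
            rw [ih]
            constructor
            · rintro (h | ⟨h1, h2, h3⟩)
              · exact Or.inl h
              · exact Or.inr ⟨by simp [h1], h2, h3⟩
            · rintro (h | ⟨h1, h2, h3⟩)
              · exact Or.inl h
              · rcases List.mem_cons.1 h1 with rfl | h1'
                · exact absurd h3 hv3
                · exact Or.inr ⟨h1', h2, h3⟩
        · rw [if_neg (by simp; exact fun _ h => absurd h hv2)]
          rw [ih]
          constructor
          · rintro (h | ⟨h1, h2, h3⟩)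
            · exact Or.inl h
            · exact Or.inr ⟨by simp [h1], h2, h3⟩
          · rintro (h | ⟨h1, h2, h3⟩)
            · exact Or.inl h
            · rcases List.mem_cons.1 h1 with rfl | h1'
              · exact absurd h2 hv2
              · exact Or.inr ⟨h1', h2, h3⟩

theorem pvDfsStep_nodup (adj : List (Int × List (Int × Int))) (l : List Int)
    (vset : PySem.Set Int) (f : Bool) (u : Int) (p0 : PySem.Set Int × List Int)
    (h : p0.1.Nodup) : (pvDfsStep adj l vset f u p0).1.Nodup := by
  induction l generalizing p0 with
  | nil => exact h
  | cons v vs ih =>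
      simp only [pvDfsStep, List.foldl_cons] at *
      split
      · exact ih _ (PySem.Set.nodup_add _ _ h)
      · exact ih _ h

theorem pvDfsStep_stackOld (adj : List (Int × List (Int × Int))) (l : List Int)
    (vset : PySem.Set Int) (f : Bool) (u : Int) (p0 : PySem.Set Int × List Int)
    (x : Int) (hx : x ∈ p0.2) : x ∈ (pvDfsStep adj l vset f u p0).2 := by
  induction l generalizing p0 with
  | nil => exact hx
  | cons v vs ih =>
      simp only [pvDfsStep, List.foldl_cons] at *
      split
      · exact ih _ (by simp [hx])
      · exact ih _ hx

theorem pvDfsStep_stackMem (adj : List (Int × List (Int × Int))) (l : List Int)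
    (vset : PySem.Set Int) (f : Bool) (u : Int) (p0 : PySem.Set Int × List Int)
    (x : Int) (hx : x ∈ (pvDfsStep adj l vset f u p0).2) :
    x ∈ p0.2 ∨ x ∈ (pvDfsStep adj l vset f u p0).1 := by
  induction l generalizing p0 with
  | nil => exact Or.inl hx
  | cons v vs ih =>
      simp only [pvDfsStep, List.foldl_cons] at *
      by_cases hc : ((!(PySem.Set.contains p0.1 v) && PySem.Set.contains vset v)
          && ((f && (pvLookupA adj u v != 0)) || (!f && (pvLookupA adj v u != 0)))) = true
      · rw [if_pos hc] at hx ⊢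
        rcases ih _ hx with h | h
        · rcases List.mem_append.1 h with h' | h'
          · exact Or.inl h'
          · refine Or.inr (pvDfsStep_mono adj vs vset f u _ x ?_)
            simp [PySem.Set.mem_add, List.mem_singleton.1 h']
        · exact Or.inr h
      · rw [if_neg hc] at hx ⊢
        exact ih _ hx

theorem pvDfsStep_newPushed (adj : List (Int × List (Int × Int))) (l : List Int)
    (vset : PySem.Set Int) (f : Bool) (u : Int) (p0 : PySem.Set Int × List Int)
    (x : Int) (hx : x ∈ (pvDfsStep adj l vset f u p0).1) :
    x ∈ p0.1 ∨ x ∈ (pvDfsStep adj l vset f u p0).2 := by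
  induction l generalizing p0 with
  | nil => exact Or.inl hx
  | cons v vs ih =>
      simp only [pvDfsStep, List.foldl_cons] at *
      by_cases hc : ((!(PySem.Set.contains p0.1 v) && PySem.Set.contains vset v)
          && ((f && (pvLookupA adj u v != 0)) || (!f && (pvLookupA adj v u != 0)))) = true
      · rw [if_pos hc] at hx ⊢
        rcases ih _ hx with h | h
        · rcases (PySem.Set.mem_add _ _ _).1 h with h' | rfl
          · exact Or.inl h'
          · exact Or.inr (pvDfsStep_stackOld adj vs vset f u _ x (by simp))
        · exact Or.inr h
      · rw [if_neg hc] at hx ⊢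
        exact ih _ hx

theorem pvDfsLoop_spec (adj : List (Int × List (Int × Int))) (f : Bool) (vs : List Int) (s : Int) :
    ∀ (visited : PySem.Set Int) (stack : List Int),
    visited.Nodup →
    (∀ x ∈ stack, x ∈ visited) →
    (∀ x ∈ visited, pvR adj f vs s x) →
    (∀ u ∈ visited, u ∉ stack → ∀ v ∈ vs, pvEdgeB adj f u v = true → v ∈ visited) →
    (pvDfsLoop adj vs (PySem.Set.ofList vs) f visited stack).Nodup ∧
    (∀ x ∈ visited, x ∈ pvDfsLoop adj vs (PySem.Set.ofList vs) f visited stack) ∧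
    (∀ x ∈ pvDfsLoop adj vs (PySem.Set.ofList vs) f visited stack, pvR adj f vs s x) ∧
    (∀ u ∈ pvDfsLoop adj vs (PySem.Set.ofList vs) f visited stack, ∀ v ∈ vs,
      pvEdgeB adj f u v = true → v ∈ pvDfsLoop adj vs (PySem.Set.ofList vs) f visited stack) := by
  intro visited stack
  induction visited, stack using pvDfsLoop.induct adj vs (PySem.Set.ofList vs) f with
  | case1 visited stack hlast =>
      intro hnd hst hR hcl
      rw [pvDfsLoop, hlast]
      have hstack : stack = [] := by
        cases stack with
        | nil => rfl
        | cons a t => simp at hlast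
      subst hstack
      refine ⟨hnd, fun x hx => hx, hR, ?_⟩
      intro u hu v hv he
      exact hcl u hu (by simp) v hv he
  | case2 visited stack u hlast q ih =>
      intro hnd hst hR hcl
      have hq : q = pvDfsStep adj vs (PySem.Set.ofList vs) f u (visited, stack.dropLast) := rfl
      rw [hq] at ih
      clear_value q
      have hloop : pvDfsLoop adj vs (PySem.Set.ofList vs) f visited stack =
          pvDfsLoop adj vs (PySem.Set.ofList vs) f
            (pvDfsStep adj vs (PySem.Set.ofList vs) f u (visited, stack.dropLast)).1
            (pvDfsStep adj vs (PySem.Set.ofList vs) f u (visited, stack.dropLast)).2 := by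
        conv_lhs => rw [pvDfsLoop, hlast]
      set p := pvDfsStep adj vs (PySem.Set.ofList vs) f u (visited, stack.dropLast) with hp
      have hu_stack : u ∈ stack := List.mem_of_getLast? hlast
      have hu_vis : u ∈ visited := hst u hu_stack
      have hmono : ∀ x ∈ visited, x ∈ p.1 := fun x hx =>
        pvDfsStep_mono adj vs (PySem.Set.ofList vs) f u (visited, stack.dropLast) x hx
      have hmem : ∀ x, x ∈ p.1 ↔ x ∈ visited ∨ (x ∈ vs ∧ pvEdgeB adj f u x = true) := by
        intro x
        rw [hp, pvDfsStep_mem]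
        simp [PySem.Set.mem_ofList]
      have hstack_split : stack = stack.dropLast ++ [u] := by
        have := List.dropLast_append_getLast? (l := stack) (a := u) hlast
        simpa using this.symm
      -- establish the four premises for the recursive call
      have h1 : p.1.Nodup :=
        pvDfsStep_nodup adj vs (PySem.Set.ofList vs) f u (visited, stack.dropLast) hnd
      have h2 : ∀ x ∈ p.2, x ∈ p.1 := by
        intro x hx
        rcases pvDfsStep_stackMem adj vs (PySem.Set.ofList vs) f u (visited, stack.dropLast) x hx with h | h
        · exact hmono x (hst x (by rw [hstack_split]; exact List.mem_append_left _ h))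
        · exact h
      have h3 : ∀ x ∈ p.1, pvR adj f vs s x := by
        intro x hx
        rcases (hmem x).1 hx with h | ⟨h1', h2'⟩
        · exact hR x h
        · exact Relation.ReflTransGen.tail (hR u hu_vis) ⟨h1', h2'⟩
      have h4 : ∀ u' ∈ p.1, u' ∉ p.2 → ∀ v ∈ vs, pvEdgeB adj f u' v = true → v ∈ p.1 := by
        intro u' hu' hu'2 v hv he
        by_cases hequ : u' = u
        · subst hequ
          exact (hmem v).2 (Or.inr ⟨hv, he⟩)
        · rcases pvDfsStep_newPushed adj vs (PySem.Set.ofList vs) f u (visited, stack.dropLast) u' hu' with h | h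
          · have hu'stack : u' ∉ stack := by
              intro hin
              rw [hstack_split] at hin
              rcases List.mem_append.1 hin with h' | h'
              · exact hu'2 (pvDfsStep_stackOld adj vs (PySem.Set.ofList vs) f u _ u' h')
              · exact hequ (List.mem_singleton.1 h')
            exact hmono v (hcl u' h hu'stack v hv he)
          · exact absurd h hu'2
      rcases ih h1 h2 h3 h4 with ⟨c1, c2, c3, c4⟩
      rw [hloop]
      exact ⟨c1, fun x hx => c2 x (hmono x hx), c3, c4⟩

theorem pv_ofList_singleton (s : Int) : (PySem.Set.ofList [s] : PySem.Set Int) = [s] := by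
  simp [PySem.Set.ofList_eq_self_of_nodup]

theorem pvDfsLoop_full (adj : List (Int × List (Int × Int))) (f : Bool) (vs : List Int) (s : Int) :
    (pvDfsLoop adj vs (PySem.Set.ofList vs) f (PySem.Set.ofList [s]) [s]).Nodup ∧
    (∀ x, x ∈ pvDfsLoop adj vs (PySem.Set.ofList vs) f (PySem.Set.ofList [s]) [s] ↔ pvR adj f vs s x) := by
  have hs : (PySem.Set.ofList [s] : PySem.Set Int) = [s] := pv_ofList_singleton s
  have hspec := pvDfsLoop_spec adj f vs s (PySem.Set.ofList [s]) [s]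
    (by rw [hs]; simp)
    (by intro x hx; rw [hs]; exact hx)
    (by intro x hx; rw [hs] at hx; rcases List.mem_singleton.1 hx with rfl; exact Relation.ReflTransGen.refl)
    (by intro u hu hustack; rw [hs] at hu; exact absurd hu hustack)
  rcases hspec with ⟨c1, c2, c3, c4⟩
  refine ⟨c1, fun x => ⟨c3 x, ?_⟩⟩
  intro hx
  induction hx with
  | refl => exact c2 s (by rw [hs]; simp)
  | tail _ hstep ih => exact c4 _ ih _ hstep.1 hstep.2

-- ==== B side ====

theorem pv_foldl_range {α : Type} (F : α → α) (n : Nat) (init : α) :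
    (List.range n).foldl (fun r _ => F r) init = F^[n] init := by
  induction n with
  | zero => simp
  | succ m ih => rw [List.range_succ, List.foldl_append, ih, Function.iterate_succ_apply']; rfl

theorem pvRound_mem (adj : List (Int × List (Int × Int))) (vs : List Int) (f : Bool)
    (reach : PySem.Set Int) (x : Int) :
    x ∈ pvRound adj vs f reach ↔
      x ∈ reach ∨ (x ∈ vs ∧ ∃ u ∈ reach, pvEdgeB adj f u x = true) := by
  unfold pvRound
  rw [PySem.Set.mem_union, PySem.Set.mem_ofList]
  constructor
  · rintro (h | h)
    · exact Or.inl h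
    · rcases List.mem_filter.1 h with ⟨h1, h2⟩
      simp only [Bool.and_eq_true, List.any_eq_true] at h2
      exact Or.inr ⟨h1, h2.2⟩
  · rintro (h | ⟨h1, h2⟩)
    · exact Or.inl h
    · by_cases hr : x ∈ reach
      · exact Or.inl hr
      · refine Or.inr (List.mem_filter.2 ⟨h1, ?_⟩)
        simp only [Bool.and_eq_true, List.any_eq_true]
        refine ⟨by simp; exact hr, h2⟩

theorem pvRound_nodup (adj : List (Int × List (Int × Int))) (vs : List Int) (f : Bool)
    (reach : PySem.Set Int) (h : reach.Nodup) : (pvRound adj vs f reach).Nodup :=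
  PySem.Set.nodup_union _ _ h

theorem pvRound_fix (adj : List (Int × List (Int × Int))) (vs : List Int) (f : Bool)
    (reach : PySem.Set Int)
    (h : ∀ v ∈ vs, (∃ u ∈ reach, pvEdgeB adj f u v = true) → v ∈ reach) :
    pvRound adj vs f reach = reach := by
  unfold pvRound
  have hfil : vs.filter (fun v =>
      !(PySem.Set.contains reach v) && reach.any (fun u => pvEdgeB adj f u v)) = [] := by
    rw [List.filter_eq_nil_iff]
    intro v hv
    by_cases hm : ∃ u ∈ reach, pvEdgeB adj f u v = true
    · have hin := h v hv hm
      simp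
      exact fun hco => absurd hin hco
    · simp only [Bool.and_eq_true, List.any_eq_true]
      rintro ⟨-, hex⟩
      exact hm hex
  rw [hfil]
  rfl

theorem pvRound_grow (adj : List (Int × List (Int × Int))) (vs : List Int) (f : Bool)
    (reach : PySem.Set Int) (hnd : reach.Nodup)
    (h : ¬ ∀ v ∈ vs, (∃ u ∈ reach, pvEdgeB adj f u v = true) → v ∈ reach) :
    reach.length < (pvRound adj vs f reach).length := by
  rw [not_forall] at h
  simp only [not_forall, exists_prop] at h
  rcases h with ⟨v, hv, hex, hnr⟩
  have hmem : v ∈ pvRound adj vs f reach := (pvRound_mem adj vs f reach v).2 (Or.inr ⟨hv, hex⟩)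
  have hsub : ∀ x ∈ reach, x ∈ pvRound adj vs f reach := fun x hx =>
    (pvRound_mem adj vs f reach x).2 (Or.inl hx)
  have hnodup := pvRound_nodup adj vs f reach hnd
  have hle : reach.length ≤ (pvRound adj vs f reach).length :=
    List.Subperm.length_le (List.subperm_of_subset hnd hsub)
  rcases Nat.lt_or_ge reach.length (pvRound adj vs f reach).length with h' | h'
  · exact h'
  · exfalso
    have hperm : reach.Perm (pvRound adj vs f reach) := by
      have hsp := List.subperm_of_subset hnd hsub
      exact List.Subperm.perm_of_length_le hsp (by omega)
    exact hnr (hperm.mem_iff.2 hmem)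

-- the saturation iterate
theorem pvSat_props (adj : List (Int × List (Int × Int))) (vs : List Int) (f : Bool) (s : Int)
    (hs : s ∈ vs) (n : Nat) :
    ((pvRound adj vs f)^[n] (PySem.Set.ofList [s])).Nodup ∧
    (∀ x ∈ (pvRound adj vs f)^[n] (PySem.Set.ofList [s]), x ∈ vs) ∧
    (∀ x ∈ (pvRound adj vs f)^[n] (PySem.Set.ofList [s]), pvR adj f vs s x) ∧
    s ∈ (pvRound adj vs f)^[n] (PySem.Set.ofList [s]) := by
  induction n with
  | zero =>
      rw [Function.iterate_zero_apply, pv_ofList_singleton]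
      refine ⟨by simp, ?_, ?_, by simp⟩
      · intro x hx; rcases List.mem_singleton.1 hx with rfl; exact hs
      · intro x hx; rcases List.mem_singleton.1 hx with rfl; exact Relation.ReflTransGen.refl
  | succ m ih =>
      rcases ih with ⟨i1, i2, i3, i4⟩
      rw [Function.iterate_succ_apply']
      refine ⟨pvRound_nodup adj vs f _ i1, ?_, ?_, ?_⟩
      · intro x hx
        rcases (pvRound_mem adj vs f _ x).1 hx with h | ⟨h1, _⟩
        · exact i2 x h
        · exact h1
      · intro x hx
        rcases (pvRound_mem adj vs f _ x).1 hx with h | ⟨h1, u, hu, he⟩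
        · exact i3 x h
        · exact Relation.ReflTransGen.tail (i3 u hu) ⟨h1, he⟩
      · exact (pvRound_mem adj vs f _ s).2 (Or.inl i4)

theorem pvSat_closed (adj : List (Int × List (Int × Int))) (vs : List Int) (f : Bool) (s : Int)
    (hs : s ∈ vs) (k : Nat) (hk : vs.length ≤ k) :
    ∀ v ∈ vs, (∃ u ∈ (pvRound adj vs f)^[k] (PySem.Set.ofList [s]), pvEdgeB adj f u v = true) →
      v ∈ (pvRound adj vs f)^[k] (PySem.Set.ofList [s]) := by
  set F := pvRound adj vs f with hF
  set S : Nat → PySem.Set Int := fun n => F^[n] (PySem.Set.ofList [s]) with hS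
  by_contra hnc
  have hnotfix : ¬ ∀ v ∈ vs, (∃ u ∈ S k, pvEdgeB adj f u v = true) → v ∈ S k := by
    simpa [hS] using hnc
  -- if some earlier level is closed, every later level equals it, contradicting hnotfix
  have hfix_forever : ∀ n, (∀ v ∈ vs, (∃ u ∈ S n, pvEdgeB adj f u v = true) → v ∈ S n) →
      ∀ m, n ≤ m → S m = S n := by
    intro n hcl m hm
    induction m with
    | zero =>
        have : n = 0 := Nat.le_zero.1 hm
        rw [this]
    | succ m' ihm =>
        rcases Nat.lt_or_ge n (m' + 1) with h' | h'
        · have hmn : n ≤ m' := Nat.lt_succ_iff.1 h'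
          have heq : S m' = S n := ihm hmn
          have : S (m' + 1) = F (S m') := by
            simp only [hS]
            rw [Function.iterate_succ_apply']
          rw [this, heq]
          exact pvRound_fix adj vs f (S n) hcl
        · have : n = m' + 1 := Nat.le_antisymm hm h'
          rw [this]
  have hnotcl : ∀ n ≤ k, ¬ ∀ v ∈ vs, (∃ u ∈ S n, pvEdgeB adj f u v = true) → v ∈ S n := by
    intro n hn hcl
    exact hnotfix (by rw [hfix_forever n hcl k hn]; exact hcl)
  have hgrow : ∀ n ≤ k, n + 1 ≤ (S n).length := by
    intro n
    induction n with
    | zero =>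
        intro _
        simp [hS, pv_ofList_singleton]
    | succ m ihm =>
        intro hm
        have h1 : m + 1 ≤ (S m).length := ihm (Nat.le_of_succ_le hm)
        have h2 : (S m).length < (S (m + 1)).length := by
          have hnd := (pvSat_props adj vs f s hs m).1
          have : S (m + 1) = F (S m) := by
            simp only [hS]
            rw [Function.iterate_succ_apply']
          rw [this]
          exact pvRound_grow adj vs f (S m) hnd (hnotcl m (Nat.le_of_succ_le hm))
        omega
  have hbound : (S k).length ≤ vs.length := by
    have hnd := (pvSat_props adj vs f s hs k).1
    have hsub := (pvSat_props adj vs f s hs k).2.1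
    exact List.Subperm.length_le (List.subperm_of_subset hnd hsub)
  have := hgrow k (Nat.le_refl k)
  omega

theorem pvSat_mem (adj : List (Int × List (Int × Int))) (vs : List Int) (f : Bool) (s : Int)
    (hs : s ∈ vs) (k : Nat) (hk : vs.length ≤ k) (x : Int) :
    x ∈ (pvRound adj vs f)^[k] (PySem.Set.ofList [s]) ↔ pvR adj f vs s x := by
  constructor
  · exact fun hx => (pvSat_props adj vs f s hs k).2.2.1 x hx
  · intro hx
    induction hx with
    | refl => exact (pvSat_props adj vs f s hs k).2.2.2
    | tail _ hstep ih =>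
        exact pvSat_closed adj vs f s hs k hk _ hstep.1 ⟨_, ih, hstep.2⟩

-- ==== glue ====

theorem pv_len_eq (adj : List (Int × List (Int × Int))) (vs : List Int) (f : Bool) (s : Int)
    (hs : s ∈ vs) (k : Nat) (hk : vs.length ≤ k) :
    (pvDfsLoop adj vs (PySem.Set.ofList vs) f (PySem.Set.ofList [s]) [s]).length =
      pvClosLen adj vs k s f := by
  unfold pvClosLen
  rw [pv_foldl_range]
  rcases pvDfsLoop_full adj f vs s with ⟨hnd1, hmem1⟩
  have hnd2 := (pvSat_props adj vs f s hs k).1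
  have hmem2 := pvSat_mem adj vs f s hs k hk
  apply List.Perm.length_eq
  apply (List.perm_ext_iff_of_nodup hnd1 hnd2).2
  intro a
  rw [hmem1 a, hmem2 a]

-- ===== VERDICT (by name: the statement is the Claim_ definition above) =====
theorem is_strongly_connected_spec : Claim_equal_is_strongly_connected := by
  unfold Claim_equal_is_strongly_connected
  intro adj vertices _ _
  unfold Spec_is_strongly_connected
  unfold is_strongly_connected is_strongly_connected_alt
  by_cases h1 : vertices.length ≤ 1
  · simp [h1]
  · by_cases h2 : vertices.length = 2
    · simp [h2]
    · simp only [h1, h2, if_false]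
      have hne : vertices ≠ [] := by
        intro h; rw [h] at h1; simp at h1
      have hs : vertices.headD 0 ∈ vertices := by
        cases vertices with
        | nil => exact absurd rfl hne
        | cons a t => simp
      have hfwd := pv_len_eq adj vertices true (vertices.headD 0) hs vertices.length (Nat.le_refl _)
      have hrev := pv_len_eq adj vertices false (vertices.headD 0) hs vertices.length (Nat.le_refl _)
      rw [hfwd, hrev]
      by_cases hF : pvClosLen adj vertices vertices.length (vertices.headD 0) true = vertices.length
      · simp [beq_eq_decide]
      · simp [beq_eq_decide]
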